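-- pv_equiv track=rewrite | github.com/Olena-Vytoshko/operations_research | src/model/utilities.py | filter_result
-- ===== SOURCE A (Python) =====
-- from typing import List
--
-- def filter_result(queens: List[List[int]]) -> List[List[int]]:
--     def filter_rotations(indx: int, result: List[List[int]]) -> None:
--         rot_queen = rotate_board(result[indx])
--         for i in range(2):
--             if rot_queen in result and len(result) > 1:
--                 result.remove(rot_queen)
--             rot_queen = rotate_board(rot_queen)
--         return None
--
--     def rotate_board(queen: List[int]) -> List[int]:
--         res = []
--         for i in range(len(queen)):
--             res.append(len(queen) - 1 - queen[i])
--         return res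
--
--     def filter_reflection(indx: int, result: List[List[int]]) -> None:
--         temp = result[indx][::-1]
--         if temp in result:
--             result.remove(temp)
--         return None
--
--     def filter_result_inner(indx: int, result: List[List[int]]) -> List[List[int]]:
--         if indx >= len(result):
--             return result
--         filter_rotations(indx, result)
--         if indx >= len(result):
--             return result
--         filter_reflection(indx, result)
--         return filter_result_inner(indx + 1, result)
--
--     return filter_result_inner(0, queens.copy())
-- ===== SOURCE B (Python) =====
-- from typing import List
--
-- def filter_result(queens: List[List[int]]) -> List[List[int]]:
--     def remove_dup(boards: List[List[int]], b: List[int]) -> None: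
--         # drop the first occurrence of b, but never empty the list
--         if len(boards) > 1 and b in boards:
--             boards.remove(b)
--
--     result = list(queens)
--     i = 0
--     while i < len(result):
--         cur = result[i]
--         rot = [len(cur) - 1 - q for q in cur]
--         remove_dup(result, rot)
--         remove_dup(result, cur)  # rotating twice gives back cur itself
--         if i >= len(result):
--             break
--         refl = result[i][::-1]
--         if refl in result:
--             result.remove(refl)
--         i += 1
--     return result
-- ===== Notes on version B (the rewrite author's own statement) =====
-- stated objective: simpler
-- what changed: Replaces the tail recursion and the three nested helper functions by one flat iterative while-loop around a single guarded-remove helper, dropping the second rotate_board call per step since rotating twice gives back the original board.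
import Mathlib
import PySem

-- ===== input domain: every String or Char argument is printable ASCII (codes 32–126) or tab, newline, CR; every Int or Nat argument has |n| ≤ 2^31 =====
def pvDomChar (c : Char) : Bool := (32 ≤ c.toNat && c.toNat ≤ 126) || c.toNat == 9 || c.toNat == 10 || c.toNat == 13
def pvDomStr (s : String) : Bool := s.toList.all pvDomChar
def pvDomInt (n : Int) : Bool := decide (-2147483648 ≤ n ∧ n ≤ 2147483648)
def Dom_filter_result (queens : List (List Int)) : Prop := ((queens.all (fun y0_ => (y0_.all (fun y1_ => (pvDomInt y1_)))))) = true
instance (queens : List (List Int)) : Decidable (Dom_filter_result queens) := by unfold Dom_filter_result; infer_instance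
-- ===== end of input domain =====

-- B replaces A's tail recursion and nested rotation/reflection helpers by one flat iterative
-- loop around a single guarded-remove helper (objective: simpler).
-- A mutates only its private copy of the input list, so the return value is the whole behaviour.

-- ===== PORT A =====
-- generic fact needed by both ports' termination: a guarded remove never lengthens the list
lemma length_erase_if_le (c : Prop) [Decidable c] (l : List (List Int)) (a : List Int) :
    (if c then l.erase a else l).length ≤ l.length := by
  split_ifs
  · exact List.length_erase_le
  · exact le_refl _

-- rotate_board: loop appending len-1-queen[i] for i in range(len), i.e. a map over the elements in order
def rotate_board (queen : List Int) : List Int :=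
  queen.map (fun q => (queen.length : Int) - 1 - q)

-- filter_rotations: result[indx] is in range at every call site (guarded by indx < len(result)),
-- so getD is exact there; 'for i in range(2)' is the foldl over List.range 2 carrying (result, rot_queen)
def filter_rotations (indx : Nat) (result : List (List Int)) : List (List Int) :=
  ((List.range 2).foldl
    (fun (st : List (List Int) × List Int) _ =>
      ((if st.2 ∈ st.1 ∧ st.1.length > 1 then st.1.erase st.2 else st.1), rotate_board st.2))
    (result, rotate_board (result.getD indx []))).1

lemma length_filter_rotations_le (indx : Nat) (result : List (List Int)) :
    (filter_rotations indx result).length ≤ result.length := by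
  simp only [filter_rotations, List.range_succ, List.range_zero, List.nil_append,
    List.singleton_append, List.foldl_cons, List.foldl_nil]
  exact le_trans (length_erase_if_le _ _ _) (length_erase_if_le _ _ _)

-- filter_reflection: result[indx][::-1] = reverse; list.remove = erase of the first occurrence
def filter_reflection (indx : Nat) (result : List (List Int)) : List (List Int) :=
  if (result.getD indx []).reverse ∈ result then result.erase (result.getD indx []).reverse
  else result

lemma length_filter_reflection_le (indx : Nat) (result : List (List Int)) :
    (filter_reflection indx result).length ≤ result.length :=
  length_erase_if_le _ _ _

def filter_result_inner (indx : Nat) (result : List (List Int)) : List (List Int) :=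
  if indx ≥ result.length then result
  else if indx ≥ (filter_rotations indx result).length then filter_rotations indx result
  else filter_result_inner (indx + 1) (filter_reflection indx (filter_rotations indx result))
termination_by result.length - indx
decreasing_by
  have h1 := length_filter_rotations_le indx result
  have h2 := length_filter_reflection_le indx (filter_rotations indx result)
  omega

def filter_result (queens : List (List Int)) : List (List Int) :=
  filter_result_inner 0 queens

-- ===== PORT B =====
-- Source B's remove_dup: drop the first occurrence of b, but never empty the list
def remove_dup (boards : List (List Int)) (b : List Int) : List (List Int) :=
  if boards.length > 1 ∧ b ∈ boards then boards.erase b else boards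

lemma length_remove_dup_le (boards : List (List Int)) (b : List Int) :
    (remove_dup boards b).length ≤ boards.length :=
  length_erase_if_le _ _ _

-- the while-loop of Source B: state (result, i); the early break is the 'i ≥ len' return
def filter_result_alt_go (result : List (List Int)) (i : Nat) : List (List Int) :=
  if i < result.length then
    let cur := result.getD i []
    let rot := cur.map (fun q => (cur.length : Int) - 1 - q)
    let r2 := remove_dup (remove_dup result rot) cur
    if i ≥ r2.length then r2
    else
      let r3 := if (r2.getD i []).reverse ∈ r2 then r2.erase (r2.getD i []).reverse else r2
      filter_result_alt_go r3 (i + 1)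
  else result
termination_by result.length - i
decreasing_by
  simp only [dite_eq_ite]
  set R2 := remove_dup (remove_dup result ((result.getD i []).map (fun q => ((result.getD i []).length : Int) - 1 - q))) (result.getD i []) with hR2
  set R3 := if (R2.getD i []).reverse ∈ R2 then R2.erase (R2.getD i []).reverse else R2 with hR3
  have e1 : R2.length ≤ result.length := by
    rw [hR2]; exact le_trans (length_remove_dup_le _ _) (length_remove_dup_le _ _)
  have e2 : R3.length ≤ R2.length := by rw [hR3]; exact length_erase_if_le _ _ _
  omega

def filter_result_alt (queens : List (List Int)) : List (List Int) :=
  filter_result_alt_go queens 0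

-- ===== PRECONDITION & SPEC =====
def Spec_filter_result (queens : List (List Int)) (out : List (List Int)) : Prop := out = filter_result_alt queens
instance (queens : List (List Int)) (out : List (List Int)) : Decidable (Spec_filter_result queens out) := by unfold Spec_filter_result; infer_instance

-- ===== CLAIM (what is proved, stated in full; the proofs are below) =====
def Claim_equal_filter_result : Prop := ∀ (queens : List (List Int)), Dom_filter_result queens → Spec_filter_result queens (filter_result queens)

-- ===== LEMMAS AND PROOFS =====
lemma rotate_involutive (q : List Int) : rotate_board (rotate_board q) = q := by
  simp only [rotate_board, List.map_map, List.length_map]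
  conv_rhs => rw [← List.map_id q]
  apply List.map_congr_left
  intro a _
  simp only [Function.comp_apply, id_eq]
  ring

-- A's two rotation removals equal B's remove_dup chain: the second rotation is the original board
lemma rots_eq (i : Nat) (result : List (List Int)) :
    filter_rotations i result =
      remove_dup (remove_dup result
          ((result.getD i []).map (fun q => ((result.getD i []).length : Int) - 1 - q)))
        (result.getD i []) := by
  simp only [filter_rotations, remove_dup, List.range_succ, List.range_zero, List.nil_append,
    List.singleton_append, List.foldl_cons, List.foldl_nil]
  have hinv := rotate_involutive (result.getD i [])
  simp only [rotate_board] at hinv ⊢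
  rw [hinv]
  have hA : (if (result.getD i []).map (fun q => ((result.getD i []).length : Int) - 1 - q) ∈ result ∧ result.length > 1 then result.erase ((result.getD i []).map (fun q => ((result.getD i []).length : Int) - 1 - q)) else result) = (if result.length > 1 ∧ (result.getD i []).map (fun q => ((result.getD i []).length : Int) - 1 - q) ∈ result then result.erase ((result.getD i []).map (fun q => ((result.getD i []).length : Int) - 1 - q)) else result) := by
    split_ifs <;> tauto
  rw [hA]
  generalize (if result.length > 1 ∧ (result.getD i []).map (fun q => ((result.getD i []).length : Int) - 1 - q) ∈ result then result.erase ((result.getD i []).map (fun q => ((result.getD i []).length : Int) - 1 - q)) else result) = s1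
  split_ifs <;> tauto

lemma inner_eq_go (n : Nat) :
    ∀ (result : List (List Int)) (i : Nat), result.length - i ≤ n →
      filter_result_inner i result = filter_result_alt_go result i := by
  induction n with
  | zero =>
    intro result i h
    rw [filter_result_inner.eq_def, filter_result_alt_go.eq_def]
    have hge : i ≥ result.length := by omega
    simp [hge, Nat.not_lt.mpr hge]
  | succ n ih =>
    intro result i h
    rw [filter_result_inner.eq_def, filter_result_alt_go.eq_def]
    by_cases hlt : i < result.length
    · rw [if_neg (by omega : ¬ i ≥ result.length), if_pos hlt]
      simp only []
      rw [rots_eq i result]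
      have hlen : (remove_dup (remove_dup result ((result.getD i []).map (fun q => ((result.getD i []).length : Int) - 1 - q))) (result.getD i [])).length ≤ result.length :=
        le_trans (length_remove_dup_le _ _) (length_remove_dup_le _ _)
      generalize remove_dup (remove_dup result ((result.getD i []).map (fun q => ((result.getD i []).length : Int) - 1 - q))) (result.getD i []) = r2 at hlen ⊢
      split_ifs with hge hrefl
      · rfl
      · have h3 := length_filter_reflection_le i r2
        rw [ih (filter_reflection i r2) (i + 1) (by omega)]
        congr 1
        simp only [filter_reflection]
        rw [if_pos hrefl]
      · have h3 := length_filter_reflection_le i r2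
        rw [ih (filter_reflection i r2) (i + 1) (by omega)]
        congr 1
        simp only [filter_reflection]
        rw [if_neg hrefl]
    · rw [if_pos (by omega : i ≥ result.length), if_neg hlt]

-- ===== VERDICT (by name: the statement is the Claim_ definition above) =====
theorem filter_result_spec : Claim_equal_filter_result := by
  intro queens _
  unfold Spec_filter_result filter_result filter_result_alt
  exact inner_eq_go queens.length queens 0 (by omega)
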